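-- pv_equiv track=rewrite | github.com/bigguy6883/Solar-Smart-Clock | solar_clock/views/layout_helpers.py | calculate_grid_positions
-- ===== SOURCE A (Python) =====
-- from typing import Tuple
--
-- def calculate_grid_positions(
--     width: int,
--     height: int,
--     rows: int,
--     cols: int,
--     cell_width: int,
--     cell_height: int,
--     margin: int = 10,
-- ) -> list[Tuple[int, int]]:
--     """
--     Calculate positions for a grid layout.
--
--     Args:
--         width: Total available width
--         height: Total available height
--         rows: Number of rows
--         cols: Number of columns
--         cell_width: Width of each cell
--         cell_height: Height of each cell
--         margin: Margin from edges
--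
--     Returns:
--         List of (x, y) tuples for each grid cell (row-major order)
--     """
--     positions = []
--
--     # Calculate spacing
--     total_grid_width = cols * cell_width
--     total_grid_height = rows * cell_height
--
--     available_width = width - (2 * margin)
--     available_height = height - (2 * margin)
--
--     h_gap = (available_width - total_grid_width) // (cols + 1) if cols > 1 else 0
--     v_gap = (available_height - total_grid_height) // (rows + 1) if rows > 1 else 0
--
--     # Calculate starting position
--     start_x = margin + h_gap
--     start_y = margin + v_gap
--
--     # Generate positions
--     for row in range(rows):
--         for col in range(cols):
--             x = start_x + col * (cell_width + h_gap)
--             y = start_y + row * (cell_height + v_gap)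
--             positions.append((x, y))
--
--     return positions
-- ===== SOURCE B (Python) =====
-- def calculate_grid_positions(
--     width: int,
--     height: int,
--     rows: int,
--     cols: int,
--     cell_width: int,
--     cell_height: int,
--     margin: int = 10,
-- ):
--     # Translation-based construction: place the first cell, build the first row by
--     # repeatedly adding the horizontal pitch, then emit each subsequent row by
--     # translating the previous row by the vertical pitch. No per-cell index
--     # arithmetic (start + index*pitch) is ever computed.
--     if rows <= 0 or cols <= 0:
--         return []
--     h_gap = (width - 2 * margin - cols * cell_width) // (cols + 1) if cols > 1 else 0
--     v_gap = (height - 2 * margin - rows * cell_height) // (rows + 1) if rows > 1 else 0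
--     dx = cell_width + h_gap
--     dy = cell_height + v_gap
--     row = []
--     x = margin + h_gap
--     for _ in range(cols):
--         row.append((x, margin + v_gap))
--         x += dx
--     positions = []
--     for _ in range(rows):
--         positions += row
--         row = [(px, py + dy) for (px, py) in row]
--     return positions
-- ===== Notes on version B (the rewrite author's own statement) =====
-- stated objective: alternative
-- what changed: Replaces A's closed-form per-cell arithmetic (start + index*pitch in a fused double loop) with a translation-based generator: the first row is built by repeated addition of the horizontal pitch and every later row is the previous row translated by the vertical pitch, so no cell position is ever computed from its indices.
import Mathlib
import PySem

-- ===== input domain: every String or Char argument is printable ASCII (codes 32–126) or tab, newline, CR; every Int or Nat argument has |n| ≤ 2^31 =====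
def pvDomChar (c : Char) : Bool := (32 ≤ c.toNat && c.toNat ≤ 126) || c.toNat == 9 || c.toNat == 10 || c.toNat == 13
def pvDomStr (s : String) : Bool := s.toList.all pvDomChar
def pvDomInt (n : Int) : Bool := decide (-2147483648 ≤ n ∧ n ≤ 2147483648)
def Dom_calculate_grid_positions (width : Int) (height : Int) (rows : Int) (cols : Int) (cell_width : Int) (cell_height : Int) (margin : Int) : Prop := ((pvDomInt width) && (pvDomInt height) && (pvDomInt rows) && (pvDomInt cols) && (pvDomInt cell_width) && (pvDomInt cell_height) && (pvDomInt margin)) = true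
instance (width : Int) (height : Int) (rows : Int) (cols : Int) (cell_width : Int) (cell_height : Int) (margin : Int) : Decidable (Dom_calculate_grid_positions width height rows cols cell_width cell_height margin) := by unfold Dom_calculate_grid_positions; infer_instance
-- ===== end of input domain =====

-- B builds the grid by geometric translation (first row by repeated addition of the
-- horizontal pitch, each later row = previous row shifted by the vertical pitch)
-- instead of A's per-cell index arithmetic (objective: alternative; same return value).

-- ===== PORT A =====
def calculate_grid_positions (width : Int) (height : Int) (rows : Int) (cols : Int) (cell_width : Int) (cell_height : Int) (margin : Int) : List (Int × Int) :=
  let total_grid_width := cols * cell_width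
  let total_grid_height := rows * cell_height
  let available_width := width - 2 * margin
  let available_height := height - 2 * margin
  let h_gap := if cols > 1 then PySem.Int.floordiv (available_width - total_grid_width) (cols + 1) else 0
  let v_gap := if rows > 1 then PySem.Int.floordiv (available_height - total_grid_height) (rows + 1) else 0
  let start_x := margin + h_gap
  let start_y := margin + v_gap
  (PySem.List.pyRange 0 rows 1).foldl (fun positions row =>
    (PySem.List.pyRange 0 cols 1).foldl (fun positions col =>
      positions ++ [(start_x + col * (cell_width + h_gap), start_y + row * (cell_height + v_gap))])
      positions) []

-- ===== PORT B =====
-- first row: append a cell at the running x, then advance x by the pitch dx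
def pvBuildRow : Nat → Int → Int → Int → List (Int × Int)
  | 0, _, _, _ => []
  | n + 1, x, y, dx => (x, y) :: pvBuildRow n (x + dx) y dx

-- rows: emit the current row, then recurse on its translate by dy
def pvBuildRows : Nat → List (Int × Int) → Int → List (Int × Int)
  | 0, _, _ => []
  | n + 1, row, dy => row ++ pvBuildRows n (row.map (fun p => (p.1, p.2 + dy))) dy

def calculate_grid_positions_alt (width : Int) (height : Int) (rows : Int) (cols : Int) (cell_width : Int) (cell_height : Int) (margin : Int) : List (Int × Int) :=
  if rows ≤ 0 ∨ cols ≤ 0 then [] else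
  let h_gap := if cols > 1 then PySem.Int.floordiv (width - 2 * margin - cols * cell_width) (cols + 1) else 0
  let v_gap := if rows > 1 then PySem.Int.floordiv (height - 2 * margin - rows * cell_height) (rows + 1) else 0
  let dx := cell_width + h_gap
  let dy := cell_height + v_gap
  let row := pvBuildRow cols.toNat (margin + h_gap) (margin + v_gap) dx
  pvBuildRows rows.toNat row dy

-- ===== PRECONDITION & SPEC =====
def Spec_calculate_grid_positions (width : Int) (height : Int) (rows : Int) (cols : Int) (cell_width : Int) (cell_height : Int) (margin : Int) (out : List (Int × Int)) : Prop := out = calculate_grid_positions_alt width height rows cols cell_width cell_height margin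
instance (width : Int) (height : Int) (rows : Int) (cols : Int) (cell_width : Int) (cell_height : Int) (margin : Int) (out : List (Int × Int)) : Decidable (Spec_calculate_grid_positions width height rows cols cell_width cell_height margin out) := by unfold Spec_calculate_grid_positions; infer_instance

-- ===== CLAIM (what is proved, stated in full; the proofs are below) =====
def Claim_equal_calculate_grid_positions : Prop := ∀ (width : Int) (height : Int) (rows : Int) (cols : Int) (cell_width : Int) (cell_height : Int) (margin : Int), Dom_calculate_grid_positions width height rows cols cell_width cell_height margin → Spec_calculate_grid_positions width height rows cols cell_width cell_height margin (calculate_grid_positions width height rows cols cell_width cell_height margin)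

-- ===== LEMMAS AND PROOFS =====

-- A's append-in-a-fold inner loop over one row equals init ++ the mapped row.
theorem pv_inner_row (l : List Int) (f : Int → Int × Int) (init : List (Int × Int)) :
    l.foldl (fun acc c => acc ++ [f c]) init = init ++ l.map f := by
  induction l generalizing init with
  | nil => simp
  | cons c cs ih => simp [List.foldl, ih]

-- A's whole double fold in cartesian form.
theorem pv_grid (rs cs : List Int) (fx fy : Int → Int) :
    rs.foldl (fun acc r => cs.foldl (fun acc c => acc ++ [(fx c, fy r)]) acc) [] =
    rs.flatMap (fun r => cs.map (fun c => (fx c, fy r))) := by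
  have h : ∀ init : List (Int × Int),
      rs.foldl (fun acc r => cs.foldl (fun acc c => acc ++ [(fx c, fy r)]) acc) init =
      init ++ rs.flatMap (fun r => cs.map (fun c => (fx c, fy r))) := by
    induction rs with
    | nil => simp
    | cons r rest ih =>
      intro init
      rw [List.foldl_cons, ih, pv_inner_row]
      simp [List.append_assoc]
  simpa using h []

-- B's first-row builder in closed form.
theorem pv_buildRow_eq (n : Nat) (y dx : Int) : ∀ x : Int,
    pvBuildRow n x y dx = (List.range n).map (fun c : Nat => (x + (c : Int) * dx, y)) := by
  induction n with
  | zero => intro x; simp [pvBuildRow]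
  | succ n ih =>
    intro x
    rw [pvBuildRow, ih (x + dx), List.range_succ_eq_map, List.map_cons, List.map_map]
    congr 1
    · simp
    · apply List.map_congr_left
      intro c _
      simp only [Function.comp, Prod.mk.injEq]
      exact ⟨by push_cast; ring, trivial⟩

-- translating the seed row commutes with pvBuildRows.
theorem pv_buildRows_shift (n : Nat) (dy : Int) : ∀ row : List (Int × Int),
    pvBuildRows n (row.map (fun p => (p.1, p.2 + dy))) dy
      = (pvBuildRows n row dy).map (fun p => (p.1, p.2 + dy)) := by
  induction n with
  | zero => intro row; simp [pvBuildRows]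
  | succ n ih =>
    intro row
    rw [pvBuildRows, pvBuildRows, List.map_append, ih (row.map (fun p => (p.1, p.2 + dy)))]

-- B's row loop in closed form.
theorem pv_buildRows_eq (n : Nat) (row : List (Int × Int)) (dy : Int) :
    pvBuildRows n row dy
      = (List.range n).flatMap (fun r : Nat => row.map (fun p => (p.1, p.2 + (r : Int) * dy))) := by
  induction n with
  | zero => simp [pvBuildRows]
  | succ n ih =>
    rw [pvBuildRows, pv_buildRows_shift, ih, List.map_flatMap,
        List.range_succ_eq_map, List.flatMap_cons, List.flatMap_map]
    congr 1
    · simp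
    · apply List.flatMap_congr
      intro r _
      simp only [List.map_map]
      apply List.map_congr_left
      intro p _
      simp only [Function.comp, Prod.mk.injEq]
      exact ⟨trivial, by push_cast; ring⟩

-- ===== VERDICT (by name: the statement is the Claim_ definition above) =====
theorem calculate_grid_positions_spec : Claim_equal_calculate_grid_positions := by
  intro width height rows cols cell_width cell_height margin _
  unfold Spec_calculate_grid_positions calculate_grid_positions calculate_grid_positions_alt
  by_cases h : rows ≤ 0 ∨ cols ≤ 0
  · rw [if_pos h, pv_grid]
    rcases h with h | h
    · simp [PySem.List.pyRange_one_eq_nil (show rows ≤ (0:Int) from h)]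
    · simp [PySem.List.pyRange_one_eq_nil (show cols ≤ (0:Int) from h)]
  · rw [if_neg h, pv_grid, pv_buildRows_eq, pv_buildRow_eq,
        PySem.List.pyRange_one 0 rows, List.flatMap_map]
    simp only [Int.sub_zero]
    apply List.flatMap_congr
    intro r _
    rw [PySem.List.pyRange_one 0 cols]
    simp only [List.map_map, Int.sub_zero]
    apply List.map_congr_left
    intro c _
    simp only [Function.comp, Prod.mk.injEq]
    exact ⟨by ring, by ring⟩
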